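-- pv_equiv track=rewrite | github.com/zero0205/Algorithm_Python | 프로그래머스/최고의 집합.py | solution
-- ===== SOURCE A (Python) =====
-- def solution(n, s):
--     answer  = []
--     if s > n:
--         answer= [s//n for _ in range(n)]
--         total = sum(answer)
--         idx = n-1
--         while True:
--             if total == s:
--                 return answer
--             else:
--                 answer[idx] += 1
--                 total += 1
--                 idx -= 1
--     else:
--         return [-1]
-- ===== SOURCE B (Python) =====
-- def solution(n, s):
--     if s <= n:
--         return [-1]
--     base, r = divmod(s, n)
--     return [base] * (n - r) + [base + 1] * r
-- ===== Notes on version B (the rewrite author's own statement) =====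
-- stated objective: simpler
-- what changed: Replaces the build-then-increment while-loop (make n copies of s//n, then bump trailing elements one by one until the sum reaches s) with a closed-form divmod: r = s mod n elements must be base+1, so return [base]*(n-r) + [base+1]*r directly with no loop.
import Mathlib
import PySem

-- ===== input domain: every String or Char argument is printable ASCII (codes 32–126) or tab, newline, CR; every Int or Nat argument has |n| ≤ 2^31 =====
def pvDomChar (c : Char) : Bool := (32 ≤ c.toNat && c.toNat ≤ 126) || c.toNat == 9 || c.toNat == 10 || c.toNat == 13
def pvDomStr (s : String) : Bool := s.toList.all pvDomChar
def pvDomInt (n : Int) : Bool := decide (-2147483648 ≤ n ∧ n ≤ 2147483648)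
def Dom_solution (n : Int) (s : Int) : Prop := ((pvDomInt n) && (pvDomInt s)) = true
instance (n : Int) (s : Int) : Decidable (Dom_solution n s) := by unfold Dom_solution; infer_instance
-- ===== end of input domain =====

-- B replaces A's build-then-increment while-loop by a closed-form divmod construction (simpler, no loop).

-- ===== PORT A =====
-- the 'while True' loop; fuel = s - total ticks remaining (the loop adds 1 to total each pass,
-- returning when total == s; within Pre_ the fuel is exact and the index stays in range, so
-- pyGetD/pySetD with default are exact there)
def solutionLoop (s : Int) (answer : List Int) (total : Int) (idx : Int) (fuel : Nat) : List Int :=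
  if total = s then answer
  else match fuel with
    | 0 => answer
    | f + 1 =>
      solutionLoop s (PySem.List.pySetD answer idx (PySem.List.pyGetD answer idx 0 + 1))
        (total + 1) (idx - 1) f

def solution (n : Int) (s : Int) : List Int :=
  if s > n then
    let answer := (PySem.List.pyRange 0 n 1).map (fun _ => PySem.Int.floordiv s n)
    let total := answer.sum
    solutionLoop s answer total (n - 1) (s - total).toNat
  else [-1]

-- ===== PORT B =====
def solution_alt (n : Int) (s : Int) : List Int :=
  if s ≤ n then [-1]
  else
    let base := PySem.Int.floordiv s n
    let r := PySem.Int.mod s n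
    List.replicate (n - r).toNat base ++ List.replicate r.toNat (base + 1)

-- ===== PRECONDITION & SPEC =====
-- Pre_ excludes exactly the inputs where A raises IndexError: n ≤ 0 with n < s and s ≠ 0
-- (the loop increments into the empty list). A returns on every other input.
def Pre_solution (n : Int) (s : Int) : Prop := ¬ (n ≤ 0 ∧ n < s ∧ s ≠ 0)
instance (n : Int) (s : Int) : Decidable (Pre_solution n s) := by unfold Pre_solution; infer_instance
def pvWitness_solution : Int × Int := (5, 12)

def Spec_solution (n : Int) (s : Int) (out : List Int) : Prop := out = solution_alt n s
instance (n : Int) (s : Int) (out : List Int) : Decidable (Spec_solution n s out) := by unfold Spec_solution; infer_instance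

-- ===== CLAIM (what is proved, stated in full; the proofs are below) =====
def Claim_equal_solution : Prop := ∀ (n : Int) (s : Int), Dom_solution n s → Pre_solution n s → Spec_solution n s (solution n s)

-- ===== LEMMAS AND PROOFS =====

-- Loop invariant: after t passes the list is (a plain copies of base) ++ (c copies of base+1),
-- total = s - fuel, idx = a - 1; fuel more passes finish the job.
lemma solutionLoop_spec (s base : Int) :
    ∀ (fuel a c : Nat), fuel ≤ a →
      solutionLoop s (List.replicate a base ++ List.replicate c (base + 1))
        (s - fuel) ((a : Int) - 1) fuel
      = List.replicate (a - fuel) base ++ List.replicate (c + fuel) (base + 1) := by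
  intro fuel
  induction fuel with
  | zero =>
    intro a c _
    simp [solutionLoop]
  | succ f ih =>
    intro a c hfa
    obtain ⟨a', rfl⟩ : ∃ a', a = a' + 1 := ⟨a - 1, by omega⟩
    rw [solutionLoop]
    rw [if_neg (by omega)]
    have hget : PySem.List.pyGetD (List.replicate (a' + 1) base ++ List.replicate c (base + 1))
        ((a' : Int) + 1 - 1) 0 = base := by
      have : ((a' : Int) + 1 - 1) = ((a' : Nat) : Int) := by omega
      rw [this, PySem.List.pyGetD_natCast]
      simp [List.getD, List.getElem?_append]
    have hset : PySem.List.pySetD (List.replicate (a' + 1) base ++ List.replicate c (base + 1))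
        ((a' : Int) + 1 - 1) (base + 1)
        = List.replicate a' base ++ List.replicate (c + 1) (base + 1) := by
      have h1 : ((a' : Int) + 1 - 1) = ((a' : Nat) : Int) := by omega
      rw [h1, PySem.List.pySetD_natCast]
      rw [List.replicate_succ' (n := a')]
      rw [List.append_assoc]
      rw [List.set_append_right _ _ (by simp)]
      simp [List.replicate_succ]
    push_cast
    rw [hget, hset]
    have h2 : s - ((f : Int) + 1) + 1 = s - (f : Int) := by ring
    have h3 : (a' : Int) + 1 - 1 - 1 = (a' : Int) - 1 := by ring
    rw [h2, h3]
    have := ih a' (c + 1) (by omega)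
    have e2 : c + (f + 1) = c + 1 + f := by omega
    rw [e2]; exact this

lemma solution_eq_alt (n s : Int) (hpre : Pre_solution n s) :
    solution n s = solution_alt n s := by
  unfold solution solution_alt
  dsimp only
  by_cases hsn : s > n
  · rw [if_pos hsn, if_neg (by omega)]
    by_cases hn : 0 < n
    · -- the regular case: n > 0
      set base := PySem.Int.floordiv s n with hbase
      set r := PySem.Int.mod s n with hr
      have hsum : base * n + r = s := PySem.Int.floordiv_mul_add_mod s n
      have hrlt : r < n ∧ 0 ≤ r := by
        rw [hr, PySem.Int.mod_eq_emod_of_pos hn]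
        exact ⟨Int.emod_lt_of_pos s hn, Int.emod_nonneg s (by omega)⟩
      have hmap : (PySem.List.pyRange 0 n 1).map (fun _ => base)
          = List.replicate n.toNat base := by
        rw [List.map_const']
        congr 1
        rw [PySem.List.length_pyRange_one]
        omega
      rw [hmap]
      have hsumrep : (List.replicate n.toNat base).sum = base * n := by
        rw [List.sum_replicate, nsmul_eq_mul]
        have : ((n.toNat : Int)) = n := by omega
        rw [this, mul_comm]
      rw [hsumrep]
      have hfuel : (s - base * n).toNat = r.toNat := by omega
      have htot : base * n = s - (r.toNat : Int) := by omega
      have hidx : n - 1 = ((n.toNat : Nat) : Int) - 1 := by omega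
      rw [hfuel, htot, hidx]
      have key := solutionLoop_spec s base r.toNat n.toNat 0 (by omega)
      simp only [List.replicate_zero, List.append_nil, Nat.zero_add] at key
      rw [key]
      congr 2
      all_goals omega
    · -- n ≤ 0: Pre_ forces s = 0 (and n < 0); the loop exits immediately with []
      have hs0 : s = 0 := by
        unfold Pre_solution at hpre
        by_contra h
        exact hpre ⟨by omega, hsn, h⟩
      subst hs0
      have hrange : PySem.List.pyRange 0 n 1 = [] :=
        PySem.List.pyRange_one_eq_nil (by omega)
      rw [hrange]
      have hm : PySem.Int.mod 0 n = 0 := by simp [PySem.Int.mod]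
      have hn0 : n.toNat = 0 := by omega
      simp [solutionLoop, hm, hn0]
  · rw [if_neg hsn, if_pos (by omega)]

-- ===== VERDICT (by name: the statement is the Claim_ definition above) =====
theorem solution_spec : Claim_equal_solution := by
  intro n s _ hpre
  exact solution_eq_alt n s hpre
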